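-- pv_equiv track=rewrite | github.com/Michaelrt86/Project-2 | Project2.py | checkScoreOptimal
-- ===== SOURCE A (Python) =====
-- def checkScoreOptimal(queenArray, n, currentScore, oldRow, movedCol): #calculate the heuritic score of a given board
--     for col, row in enumerate(queenArray): #all values on a given diagonal calculate the same value with these formulas
--         if col != movedCol:
--             #scoring col values
--             upperDiagonal = row - col
--             lowerDiagonal = row - (n - col)
--             #old values
--             upperDiagonalOld = oldRow - movedCol
--             lowerDiagonalOld = oldRow - (n - movedCol)
--             #new values
--             upperDiagonalNew = queenArray[movedCol] - movedCol
--             lowerDiagonalNew = queenArray[movedCol] - (n - movedCol)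
--
--             oldConflict = row == oldRow or upperDiagonal == upperDiagonalOld or lowerDiagonal == lowerDiagonalOld
--             newConflict = row == queenArray[movedCol] or upperDiagonal == upperDiagonalNew or lowerDiagonal == lowerDiagonalNew
--
--             if oldConflict and not newConflict:
--                 currentScore -= 1
--             elif newConflict and not oldConflict:
--                 currentScore += 1
--         #for newCol in range(col + 1, n):
--             #newUpperDiagonal = queenArray[newCol] - newCol
--             #newLowerDiagonal = queenArray[newCol] - (n - newCol)
--             #check if the two queens are in conflict on the row or either diagonal
--             #if(row == queenArray[newCol] or upperDiagonal == newUpperDiagonal or lowerDiagonal == newLowerDiagonal):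
--                 #hscore += 1
--     return currentScore
-- ===== SOURCE B (Python) =====
-- from collections import Counter
--
-- def checkScoreOptimal(queenArray, n, currentScore, oldRow, movedCol):
--     # Index by line: bucket the other queens' rows and both diagonals into
--     # Counters once; each conflict count is then three dictionary lookups
--     # (the three line tests are mutually exclusive for a queen in another
--     # column, so the lookups sum to the boolean-or count A tallies).
--     if not queenArray:
--         return currentScore
--     newRow = queenArray[movedCol]
--     others = [(c, r) for c, r in enumerate(queenArray) if c != movedCol]
--     rows = Counter(r for _, r in others)
--     ups = Counter(r - c for c, r in others)
--     lows = Counter(r + c for c, r in others)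
--     oldCount = rows[oldRow] + ups[oldRow - movedCol] + lows[oldRow + movedCol]
--     newCount = rows[newRow] + ups[newRow - movedCol] + lows[newRow + movedCol]
--     return currentScore + newCount - oldCount
-- ===== Notes on version B (the rewrite author's own statement) =====
-- stated objective: alternative
-- what changed: A scans the board applying a per-column conditional -1/+1 with boolean conflict tests; B instead builds three Counter hash indexes (rows, up-diagonals r-c, down-diagonals r+c) over the non-moved columns and computes each conflict count as three dictionary lookups, which sum correctly because the three line tests are mutually exclusive for a queen in another column; the n-dependent anti-diagonal test cancels to r+c.
import Mathlib
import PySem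

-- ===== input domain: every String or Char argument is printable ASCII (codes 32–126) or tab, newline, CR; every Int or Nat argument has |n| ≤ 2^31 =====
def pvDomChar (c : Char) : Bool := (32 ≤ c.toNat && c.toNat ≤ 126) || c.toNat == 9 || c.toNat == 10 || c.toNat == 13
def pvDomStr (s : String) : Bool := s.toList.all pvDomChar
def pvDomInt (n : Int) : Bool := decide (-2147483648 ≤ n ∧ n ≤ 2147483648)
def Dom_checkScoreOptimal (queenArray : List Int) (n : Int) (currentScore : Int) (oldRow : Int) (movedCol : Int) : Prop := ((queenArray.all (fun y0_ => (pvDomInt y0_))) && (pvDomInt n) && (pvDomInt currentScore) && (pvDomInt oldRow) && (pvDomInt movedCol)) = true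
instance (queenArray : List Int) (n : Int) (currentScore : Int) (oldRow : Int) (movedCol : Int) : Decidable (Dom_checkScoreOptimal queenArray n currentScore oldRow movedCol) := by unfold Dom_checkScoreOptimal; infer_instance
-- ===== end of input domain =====

-- B replaces A's per-column conditional ±1 scan by three Counter indexes (rows and both diagonals of the
-- non-moved queens) queried at the old and new positions (objective: alternative).

-- ===== PORT A =====
-- literal transliteration of A's loop; (….getD 0) is reached only where Python raises IndexError (excluded by Pre_)
def checkScoreOptimal (queenArray : List Int) (n : Int) (currentScore : Int) (oldRow : Int) (movedCol : Int) : Int :=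
  (PySem.List.enumerate queenArray).foldl
    (fun cs p =>
      let col := p.1
      let row := p.2
      if col ≠ movedCol then
        let upperDiagonal := row - col
        let lowerDiagonal := row - (n - col)
        let upperDiagonalOld := oldRow - movedCol
        let lowerDiagonalOld := oldRow - (n - movedCol)
        let newRow := (PySem.List.pyGet? queenArray movedCol).getD 0
        let upperDiagonalNew := newRow - movedCol
        let lowerDiagonalNew := newRow - (n - movedCol)
        let oldConflict := row == oldRow || upperDiagonal == upperDiagonalOld || lowerDiagonal == lowerDiagonalOld
        let newConflict := row == newRow || upperDiagonal == upperDiagonalNew || lowerDiagonal == lowerDiagonalNew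
        if oldConflict && !newConflict then cs - 1
        else if newConflict && !oldConflict then cs + 1
        else cs
      else cs)
    currentScore

-- ===== PORT B =====
def checkScoreOptimal_alt (queenArray : List Int) (n : Int) (currentScore : Int) (oldRow : Int) (movedCol : Int) : Int :=
  match queenArray with
  | [] => currentScore
  | _ =>
    let newRow := (PySem.List.pyGet? queenArray movedCol).getD 0  -- Python raises IndexError outside Pre_
    let others := (PySem.List.enumerate queenArray).filter (fun p => p.1 != movedCol)
    let rows := PySem.Dict.counter (others.map (fun p => p.2))
    let ups := PySem.Dict.counter (others.map (fun p => p.2 - p.1))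
    let lows := PySem.Dict.counter (others.map (fun p => p.2 + p.1))
    let oldCount := rows.getD oldRow 0 + ups.getD (oldRow - movedCol) 0 + lows.getD (oldRow + movedCol) 0
    let newCount := rows.getD newRow 0 + ups.getD (newRow - movedCol) 0 + lows.getD (newRow + movedCol) 0
    currentScore + newCount - oldCount

-- ===== PRECONDITION & SPEC =====
-- Pre_ excludes exactly the inputs where queenArray[movedCol] raises IndexError (both A and B raise there).
def Pre_checkScoreOptimal (queenArray : List Int) (n : Int) (currentScore : Int) (oldRow : Int) (movedCol : Int) : Prop :=
  queenArray = [] ∨ (-(queenArray.length : Int) ≤ movedCol ∧ movedCol < queenArray.length)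
instance (queenArray : List Int) (n : Int) (currentScore : Int) (oldRow : Int) (movedCol : Int) : Decidable (Pre_checkScoreOptimal queenArray n currentScore oldRow movedCol) := by unfold Pre_checkScoreOptimal; infer_instance
def pvWitness_checkScoreOptimal : List Int × Int × Int × Int × Int := ([0, 2, 1], 3, 2, 0, 1)

def Spec_checkScoreOptimal (queenArray : List Int) (n : Int) (currentScore : Int) (oldRow : Int) (movedCol : Int) (out : Int) : Prop := out = checkScoreOptimal_alt queenArray n currentScore oldRow movedCol
instance (queenArray : List Int) (n : Int) (currentScore : Int) (oldRow : Int) (movedCol : Int) (out : Int) : Decidable (Spec_checkScoreOptimal queenArray n currentScore oldRow movedCol out) := by unfold Spec_checkScoreOptimal; infer_instance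

-- ===== CLAIM =====
def Claim_equal_checkScoreOptimal : Prop := ∀ (queenArray : List Int) (n : Int) (currentScore : Int) (oldRow : Int) (movedCol : Int), Dom_checkScoreOptimal queenArray n currentScore oldRow movedCol → Pre_checkScoreOptimal queenArray n currentScore oldRow movedCol → Spec_checkScoreOptimal queenArray n currentScore oldRow movedCol (checkScoreOptimal queenArray n currentScore oldRow movedCol)

-- ===== LEMMAS AND PROOFS =====

-- the anti-diagonal test with n cancels to an n-free form
theorem pvDiagRw (n col row q mc : Int) :
    (row - (n - col) == q - (n - mc)) = (row + col == q + mc) := by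
  cases hb : (row - (n - col) == q - (n - mc)) <;> cases hb2 : (row + col == q + mc) <;>
    first
      | rfl
      | (exfalso; simp only [beq_iff_eq, beq_eq_false_iff_ne] at hb hb2; omega)

-- the boolean-or conflict count over A's scan equals B's three per-line counts over the filtered list
theorem pvCnt (mc r : Int) (l : List (Int × Int)) :
    ((l.filter (fun p => p.1 != mc)).countP
        (fun p => p.2 == r || p.2 - p.1 == r - mc || p.2 + p.1 == r + mc) : Int)
    = ((l.filter (fun p => p.1 != mc)).countP (fun p => p.2 == r) : Nat)
      + ((l.filter (fun p => p.1 != mc)).countP (fun p => p.2 - p.1 == r - mc) : Nat)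
      + ((l.filter (fun p => p.1 != mc)).countP (fun p => p.2 + p.1 == r + mc) : Nat) := by
  induction l with
  | nil => simp
  | cons p t ih =>
    rcases p with ⟨c, row⟩
    by_cases hc : c = mc
    · simpa [hc] using ih
    · have hcb : (c != mc) = true := by simp [hc]
      simp only [List.filter_cons, hcb, if_true, List.countP_cons]
      -- the three line tests are mutually exclusive since c ≠ mc
      by_cases h1 : (row == r) = true <;> by_cases h2 : (row - c == r - mc) = true <;>
        by_cases h3 : (row + c == r + mc) = true <;>
        simp only [beq_iff_eq] at h1 h2 h3 <;>
        first
          | (exfalso; omega)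
          | (simp [h1, h2, h3] <;> push_cast <;> omega)

-- A's fold adds the boolean-or new-conflict count and subtracts the old one
theorem pvFold_eq (n oldRow mc newRow : Int) (l : List (Int × Int)) (cs : Int) :
    l.foldl
      (fun cs p =>
        let col := p.1
        let row := p.2
        if col ≠ mc then
          let upperDiagonal := row - col
          let lowerDiagonal := row - (n - col)
          let upperDiagonalOld := oldRow - mc
          let lowerDiagonalOld := oldRow - (n - mc)
          let upperDiagonalNew := newRow - mc
          let lowerDiagonalNew := newRow - (n - mc)
          let oldConflict := row == oldRow || upperDiagonal == upperDiagonalOld || lowerDiagonal == lowerDiagonalOld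
          let newConflict := row == newRow || upperDiagonal == upperDiagonalNew || lowerDiagonal == lowerDiagonalNew
          if oldConflict && !newConflict then cs - 1
          else if newConflict && !oldConflict then cs + 1
          else cs
        else cs)
      cs
    = cs
      + ((l.filter (fun p => p.1 != mc)).countP
          (fun p => p.2 == newRow || p.2 - p.1 == newRow - mc || p.2 + p.1 == newRow + mc) : Nat)
      - ((l.filter (fun p => p.1 != mc)).countP
          (fun p => p.2 == oldRow || p.2 - p.1 == oldRow - mc || p.2 + p.1 == oldRow + mc) : Nat) := by
  induction l generalizing cs with
  | nil => simp
  | cons p t ih =>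
    rcases p with ⟨col, row⟩
    by_cases hcol : col = mc
    · simp only [List.foldl_cons, List.filter_cons, hcol]
      simpa using ih cs
    · have hcb : (col != mc) = true := by simp [hcol]
      have hO : (row - (n - col) == oldRow - (n - mc)) = (row + col == oldRow + mc) := pvDiagRw ..
      have hN : (row - (n - col) == newRow - (n - mc)) = (row + col == newRow + mc) := pvDiagRw ..
      simp only [List.foldl_cons, List.filter_cons, hcb, if_true, List.countP_cons, hO, hN,
        ne_eq, hcol, not_false_iff, ih]
      by_cases ho : (row == oldRow || row - col == oldRow - mc || row + col == oldRow + mc) = true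
        <;> by_cases hn : (row == newRow || row - col == newRow - mc || row + col == newRow + mc) = true
        <;> simp [ho, hn] <;> push_cast <;> ring

-- B's three counter lookups compute the per-line counts over the filtered list
theorem pvLookup (mc r : Int) (l : List (Int × Int)) :
    (PySem.Dict.counter ((l.filter (fun p => p.1 != mc)).map (fun p => p.2))).getD r 0
      + (PySem.Dict.counter ((l.filter (fun p => p.1 != mc)).map (fun p => p.2 - p.1))).getD (r - mc) 0
      + (PySem.Dict.counter ((l.filter (fun p => p.1 != mc)).map (fun p => p.2 + p.1))).getD (r + mc) 0
    = ((l.filter (fun p => p.1 != mc)).countP (fun p => p.2 == r) : Nat)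
      + ((l.filter (fun p => p.1 != mc)).countP (fun p => p.2 - p.1 == r - mc) : Nat)
      + ((l.filter (fun p => p.1 != mc)).countP (fun p => p.2 + p.1 == r + mc) : Nat) := by
  simp [PySem.Dict.getD_counter, List.count_eq_countP, List.countP_map, Function.comp_def]

-- ===== VERDICT =====
theorem checkScoreOptimal_spec : Claim_equal_checkScoreOptimal := by
  intro qa n cs oldRow mc _ hpre
  unfold Spec_checkScoreOptimal checkScoreOptimal checkScoreOptimal_alt
  rcases qa with _ | ⟨a, t⟩
  · simp [PySem.List.enumerate]
  · simp only []
    rw [pvFold_eq, pvCnt, pvCnt, ← pvLookup, ← pvLookup]
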